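-- pv_equiv track=rewrite | github.com/Nayefshaikh1/items-manager | phase_13/api/server.py | is_api_request
-- ===== SOURCE A (Python) =====
-- API_PATHS = [
--     "/register",
--     "/login",
--     "/items",
--     "/workflow"
-- ]
--
-- def is_api_request(path):
--
--     clean = path.split("?")[0]
--
--     for api_path in API_PATHS:
--
--         if clean == api_path:
--             return True
--
--         if clean.startswith(api_path + "/"):
--             return True
--
--     return False
-- ===== SOURCE B (Python) =====
-- API_SET = {"/register", "/login", "/items", "/workflow"}
--
-- def is_api_request(path):
--     root = []
--     for i, ch in enumerate(path):
--         if ch == "?" or (ch == "/" and i > 0):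
--             break
--         root.append(ch)
--     return "".join(root) in API_SET
-- ===== Notes on version B (the rewrite author's own statement) =====
-- stated objective: alternative
-- what changed: Replaces the query-string split plus loop over API_PATHS with equality/startswith tests per prefix by a single character scan that accumulates the first path segment (stopping at a query marker or at a slash past index 0) followed by one set-membership test.
import Mathlib
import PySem

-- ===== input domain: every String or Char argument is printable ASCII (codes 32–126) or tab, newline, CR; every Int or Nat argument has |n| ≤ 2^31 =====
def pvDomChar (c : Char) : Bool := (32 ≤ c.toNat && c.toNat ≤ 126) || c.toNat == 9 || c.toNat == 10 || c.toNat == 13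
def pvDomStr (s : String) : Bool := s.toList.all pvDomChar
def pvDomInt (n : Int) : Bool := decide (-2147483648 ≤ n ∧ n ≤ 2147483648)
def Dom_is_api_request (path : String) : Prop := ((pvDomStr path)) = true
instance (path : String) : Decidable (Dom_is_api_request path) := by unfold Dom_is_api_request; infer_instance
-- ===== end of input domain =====

-- B replaces A's '?'-split and per-prefix equality/startswith loop by one character scan that collects
-- the first path segment and does a single set-membership test: an alternative, the prefix loop is gone.

-- ===== PORT A =====
def API_PATHS : List (List Char) :=
  [['/', 'r', 'e', 'g', 'i', 's', 't', 'e', 'r'],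
   ['/', 'l', 'o', 'g', 'i', 'n'],
   ['/', 'i', 't', 'e', 'm', 's'],
   ['/', 'w', 'o', 'r', 'k', 'f', 'l', 'o', 'w']]

-- the 'for api_path in API_PATHS' loop with its two early returns
def apiLoop (clean : List Char) : List (List Char) → Bool
  | [] => false
  | p :: rest =>
    if clean = p then true
    else if PySem.Chars.startswith clean (p ++ ['/']) then true
    else apiLoop clean rest

def is_api_request (path : String) : Bool :=
  let clean := PySem.List.pyGetD ((PySem.Chars.split? path.toList ['?']).getD []) 0 []
  apiLoop clean API_PATHS

-- ===== PORT B =====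
def API_SET : PySem.Set (List Char) :=
  PySem.Set.ofList (["/register", "/login", "/items", "/workflow"].map String.toList)

-- the 'for i, ch in enumerate(path)' loop with its break, accumulating root
def rootLoop : List Char → Nat → List Char
  | [], _ => []
  | ch :: rest, i =>
    if ch = '?' ∨ (ch = '/' ∧ 0 < i) then []
    else ch :: rootLoop rest (i + 1)

def is_api_request_alt (path : String) : Bool :=
  PySem.Set.contains API_SET (rootLoop path.toList 0)

-- ===== PRECONDITION & SPEC =====
def Spec_is_api_request (path : String) (out : Bool) : Prop := out = is_api_request_alt path
instance (path : String) (out : Bool) : Decidable (Spec_is_api_request path out) := by unfold Spec_is_api_request; infer_instance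

-- ===== CLAIM (what is proved, stated in full; the proofs are below) =====
def Claim_equal_is_api_request : Prop := ∀ (path : String), Dom_is_api_request path → Spec_is_api_request path (is_api_request path)

-- ===== LEMMAS AND PROOFS =====

-- first segment of a list ('/'-boundary after index 0); used only to state the intermediate lemmas
def firstSeg : List Char → List Char
  | [] => []
  | c :: t => c :: t.takeWhile (fun d => d ≠ '/')

lemma glast {α} (x : α) (acc : List α) (h : acc ≠ []) : (x :: acc).getLast? = acc.getLast? := by
  obtain ⟨b, bs, rfl⟩ := List.exists_cons_of_ne_nil h
  exact List.getLast?_cons_cons ..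

lemma go_head_acc (sep : List Char) :
    ∀ (fuel : Nat) (l cur : List Char) (acc : List (List Char)), acc ≠ [] →
    (PySem.Chars.splitOn.go sep fuel l cur acc).head? = acc.getLast? := by
  intro fuel
  induction fuel with
  | zero =>
    intro l cur acc hacc
    rw [PySem.Chars.splitOn.go, List.head?_reverse, glast _ _ hacc]
  | succ f ih =>
    intro l cur acc hacc
    cases l with
    | nil =>
      rw [PySem.Chars.splitOn.go, List.head?_reverse, glast _ _ hacc]
      simp
    | cons c rest =>
      rw [PySem.Chars.splitOn.go]
      split
      · rw [ih _ _ _ (by simp), glast _ _ hacc]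
      · exact ih _ _ _ hacc

lemma go_head (fuel : Nat) (l cur : List Char) (h : l.length < fuel) :
    (PySem.Chars.splitOn.go ['?'] fuel l cur []).head? =
      some (cur.reverse ++ l.takeWhile (fun c => c ≠ '?')) := by
  induction l generalizing fuel cur with
  | nil =>
    cases fuel with
    | zero => omega
    | succ f => rw [PySem.Chars.splitOn.go] <;> simp
  | cons c rest ih =>
    cases fuel with
    | zero => omega
    | succ f =>
      rw [PySem.Chars.splitOn.go]
      split
      · rename_i hpre
        have hc : c = '?' := by
          have := hpre; simp [List.isPrefixOf] at this; exact this.symm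
        rw [go_head_acc _ f _ _ _ (by simp)]
        subst hc
        simp
      · rename_i hpre
        have hc : c ≠ '?' := by
          intro hc; apply hpre; subst hc; simp [List.isPrefixOf]
        rw [ih f (c :: cur) (by simpa using h)]
        simp [hc]

-- A's clean (the first piece of path.split('?')) is the chars before the first '?'
lemma clean_eq (cs : List Char) :
    PySem.List.pyGetD ((PySem.Chars.split? cs ['?']).getD []) 0 [] =
      cs.takeWhile (fun c => c ≠ '?') := by
  have h := go_head (cs.length + 1) cs [] (by omega)
  simp only [PySem.Chars.split?, PySem.Chars.splitOn]
  simp only [List.isEmpty_cons, if_false, Option.getD_some, Bool.false_eq_true]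
  cases hL : PySem.Chars.splitOn.go ['?'] (cs.length + 1) cs [] [] with
  | nil => rw [hL] at h; simp at h
  | cons x xs =>
    rw [hL] at h
    simp only [List.head?_cons, Option.some_inj] at h
    simp [PySem.List.pyGetD, PySem.List.pyGet?, PySem.List.pyIdx?, h]

lemma tw_tw (p q : Char → Bool) (l : List Char) :
    (l.takeWhile q).takeWhile p = l.takeWhile (fun a => q a && p a) := by
  induction l with
  | nil => simp
  | cons c t ih => by_cases hq : q c <;> by_cases hp : p c <;> simp [hq, hp, ih]

lemma tw_app (p : Char → Bool) (w x : List Char) (h : ∀ a ∈ w, p a) :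
    (w ++ x).takeWhile p = w ++ x.takeWhile p := by
  induction w with
  | nil => simp
  | cons c t ih =>
    simp only [List.cons_append, List.takeWhile_cons, h c (by simp), if_true, List.cons_inj_right]
    exact ih (fun a ha => h a (by simp [ha]))

lemma rootLoop_pos (l : List Char) : ∀ i, 1 ≤ i →
    rootLoop l i = l.takeWhile (fun d => decide (d ≠ '?') && decide (d ≠ '/')) := by
  induction l with
  | nil => intro i _; simp [rootLoop]
  | cons c t ih =>
    intro i hi
    rw [rootLoop]
    by_cases h : c = '?' ∨ (c = '/' ∧ 0 < i)
    · rw [if_pos h]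
      rcases h with h | ⟨h, _⟩ <;> simp [h]
    · have h1 : c ≠ '?' := fun hc => h (Or.inl hc)
      have hc2 : c ≠ '/' := fun hc => h (Or.inr ⟨hc, by omega⟩)
      rw [if_neg h]
      simp [h1, hc2, ih (i + 1) (by omega)]

lemma rootLoop_eq (cs : List Char) :
    rootLoop cs 0 = firstSeg (cs.takeWhile (fun c => c ≠ '?')) := by
  cases cs with
  | nil => simp [rootLoop, firstSeg]
  | cons c t =>
    rw [rootLoop]
    by_cases hc : c = '?'
    · simp [hc, firstSeg]
    · rw [if_neg (by simp [hc]), rootLoop_pos t 1 (le_refl 1)]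
      have h1 : List.takeWhile (fun c => decide (c ≠ '?')) (c :: t) =
          c :: t.takeWhile (fun c => decide (c ≠ '?')) := by
        simp [hc]
      simp only [h1, firstSeg, tw_tw]

lemma dropWhile_head_false (p : Char → Bool) : ∀ (l : List Char) (x : Char) (r : List Char),
    l.dropWhile p = x :: r → p x = false := by
  intro l
  induction l with
  | nil => intro x r h; simp at h
  | cons c t ih =>
    intro x r h
    by_cases hp : p c
    · rw [List.dropWhile_cons_of_pos hp] at h
      exact ih _ _ h
    · rw [List.dropWhile_cons_of_neg hp] at h
      cases h
      simpa using hp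

lemma seg_iff (w t : List Char) (hw : '/' ∉ w) :
    (t = w ∨ (w ++ ['/']) <+: t) ↔ t.takeWhile (fun d => decide (d ≠ '/')) = w := by
  constructor
  · rintro (rfl | ⟨r, hr⟩)
    · rw [List.takeWhile_eq_self_iff]
      intro a ha
      simp
      exact fun h => hw (h ▸ ha)
    · rw [← hr, List.append_assoc, tw_app _ _ _ (fun a ha => by simp; exact fun h => hw (h ▸ ha))]
      simp
  · intro h
    have hd := List.takeWhile_append_dropWhile (p := fun d => decide (d ≠ '/')) (l := t)
    cases hdw : t.dropWhile (fun d => decide (d ≠ '/')) with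
    | nil =>
      left
      rw [hdw, List.append_nil, h] at hd
      exact hd.symm
    | cons x r =>
      have hx : x = '/' := by
        have h2 := dropWhile_head_false _ t x r hdw
        simpa using h2
      subst hx
      right
      refine ⟨r, ?_⟩
      rw [hdw, h] at hd
      simpa [List.append_assoc] using hd

lemma key (w : List Char) (hw : '/' ∉ w) (cs : List Char) :
    (decide (cs = '/' :: w) || PySem.Chars.startswith cs (('/' :: w) ++ ['/'])) =
    decide (firstSeg cs = '/' :: w) := by
  cases cs with
  | nil =>
    have h2 : PySem.Chars.startswith [] ('/' :: (w ++ ['/'])) = false := by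
      rw [Bool.eq_false_iff]
      intro h
      have := (PySem.Chars.startswith_iff _ _).mp h
      simp at this
    simp [firstSeg, h2]
  | cons c t =>
    rw [Bool.eq_iff_iff]
    simp only [Bool.or_eq_true, decide_eq_true_eq, PySem.Chars.startswith_iff,
      List.cons_append, List.cons_prefix_cons, firstSeg, List.cons_eq_cons]
    constructor
    · rintro (⟨h1, h2⟩ | ⟨h1, h2⟩)
      · exact ⟨h1, by simpa using (seg_iff w t hw).mp (Or.inl h2)⟩
      · exact ⟨h1.symm, by simpa using (seg_iff w t hw).mp (Or.inr (by simpa [List.append_assoc] using h2))⟩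
    · rintro ⟨h1, h2⟩
      have := (seg_iff w t hw).mpr (by simpa using h2)
      rcases this with h | h
      · exact Or.inl ⟨h1, h⟩
      · exact Or.inr ⟨h1.symm, by simpa [List.append_assoc] using h⟩

set_option maxRecDepth 8192 in
set_option maxHeartbeats 1000000 in
lemma loop_eq (clean : List Char) :
    apiLoop clean API_PATHS = PySem.Set.contains API_SET (firstSeg clean) := by
  have k1 := key ['r', 'e', 'g', 'i', 's', 't', 'e', 'r'] (by decide) clean
  have k2 := key ['l', 'o', 'g', 'i', 'n'] (by decide) clean
  have k3 := key ['i', 't', 'e', 'm', 's'] (by decide) clean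
  have k4 := key ['w', 'o', 'r', 'k', 'f', 'l', 'o', 'w'] (by decide) clean
  simp only [List.cons_append, List.nil_append] at k1 k2 k3 k4
  have hset : API_SET =
      [['/', 'r', 'e', 'g', 'i', 's', 't', 'e', 'r'],
       ['/', 'l', 'o', 'g', 'i', 'n'],
       ['/', 'i', 't', 'e', 'm', 's'],
       ['/', 'w', 'o', 'r', 'k', 'f', 'l', 'o', 'w']] := by decide
  rw [hset]
  simp only [apiLoop, API_PATHS, Bool.if_true_left, Bool.if_false_right]
  simp only [PySem.Set.contains, List.contains_cons, List.contains_nil]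
  rw [Bool.eq_iff_iff] at k1 k2 k3 k4 ⊢
  simp only [Bool.or_eq_true, Bool.and_eq_true, decide_eq_true_eq, beq_iff_eq,
    List.cons_append, List.nil_append, Bool.false_eq_true, or_false, and_true] at k1 k2 k3 k4 ⊢
  tauto

-- ===== VERDICT (by name: the statement is the Claim_ definition above) =====
theorem is_api_request_spec : Claim_equal_is_api_request := by
  intro path _
  unfold Spec_is_api_request is_api_request is_api_request_alt
  simp only [clean_eq, rootLoop_eq, loop_eq]
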